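-- pv_equiv track=rewrite | github.com/Machaeese/CodeSample | ML Perceptron (Python).py | getNumOfLabels
-- ===== SOURCE A (Python) =====
-- def getNumOfLabels(data, label):
--     numOfLabels = [0] * 6
--     label1s = []
--     label2s = []
--     label3s = []
--     label4s = []
--     label5s = []
--     label6s = []
--     for x in range(len(label)):
--         if label[x] == 1:
--             label1s.append(data[x])
--             numOfLabels[0] += 1
--         if label[x] == 2:
--             label2s.append(data[x])
--             numOfLabels[1] += 1
--         if label[x] == 3:
--             label3s.append(data[x])
--             numOfLabels[2] += 1
--         if label[x] == 4:
--             label4s.append(data[x])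
--             numOfLabels[3] += 1
--         if label[x] == 5:
--             label5s.append(data[x])
--             numOfLabels[4] += 1
--         if label[x] == 6:
--             label6s.append(data[x])
--             numOfLabels[5] += 1
--     return numOfLabels, label1s, label2s, label3s, label4s, label5s, label6s
-- ===== SOURCE B (Python) =====
-- def getNumOfLabels(data, label):
--     def bucket(k):
--         return [data[x] for x in range(len(label)) if label[x] == k]
--     b1, b2, b3, b4, b5, b6 = bucket(1), bucket(2), bucket(3), bucket(4), bucket(5), bucket(6)
--     return [len(b) for b in (b1, b2, b3, b4, b5, b6)], b1, b2, b3, b4, b5, b6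
-- ===== Notes on version B (the rewrite author's own statement) =====
-- stated objective: idiomatic
-- what changed: Replaces the single loop with six mutable accumulators and in-place counter increments by six independent filtering comprehensions (one per label value), with the counts derived as the lengths of the buckets instead of being incremented alongside.
import Mathlib
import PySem

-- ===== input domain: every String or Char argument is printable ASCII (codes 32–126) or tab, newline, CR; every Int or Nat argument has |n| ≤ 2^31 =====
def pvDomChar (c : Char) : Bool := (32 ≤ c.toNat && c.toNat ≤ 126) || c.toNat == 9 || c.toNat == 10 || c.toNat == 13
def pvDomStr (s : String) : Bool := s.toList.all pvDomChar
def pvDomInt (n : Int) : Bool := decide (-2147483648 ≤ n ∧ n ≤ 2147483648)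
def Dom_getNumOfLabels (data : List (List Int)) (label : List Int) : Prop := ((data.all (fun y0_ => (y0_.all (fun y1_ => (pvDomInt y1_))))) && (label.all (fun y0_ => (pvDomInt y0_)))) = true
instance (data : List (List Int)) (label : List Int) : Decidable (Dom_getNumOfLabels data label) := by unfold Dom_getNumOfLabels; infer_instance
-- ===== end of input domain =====

-- B replaces A's single loop over six mutable accumulators by six independent
-- filtering comprehensions, the counts being the lengths of the buckets (idiomatic; same cost).

-- ===== PORT A =====
-- A's state: (numOfLabels, label1s, …, label6s); the loop body is stepA.
-- data[x] is ported as pyGetD with default []; exact under Pre_ (out-of-range access = IndexError, excluded).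
def pvStateA := List Int × List (List Int) × List (List Int) × List (List Int) × List (List Int) × List (List Int) × List (List Int)

def stepA (data : List (List Int)) (label : List Int) (s : pvStateA) (x : Int) : pvStateA :=
  let lv := PySem.List.pyGetD label x 0
  let dv := PySem.List.pyGetD data x ([] : List Int)
  match s with
  | (nums, l1, l2, l3, l4, l5, l6) =>
    let p1 := if lv = 1 then (PySem.List.pySetD nums 0 (PySem.List.pyGetD nums 0 0 + 1), l1 ++ [dv]) else (nums, l1)
    let p2 := if lv = 2 then (PySem.List.pySetD p1.1 1 (PySem.List.pyGetD p1.1 1 0 + 1), l2 ++ [dv]) else (p1.1, l2)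
    let p3 := if lv = 3 then (PySem.List.pySetD p2.1 2 (PySem.List.pyGetD p2.1 2 0 + 1), l3 ++ [dv]) else (p2.1, l3)
    let p4 := if lv = 4 then (PySem.List.pySetD p3.1 3 (PySem.List.pyGetD p3.1 3 0 + 1), l4 ++ [dv]) else (p3.1, l4)
    let p5 := if lv = 5 then (PySem.List.pySetD p4.1 4 (PySem.List.pyGetD p4.1 4 0 + 1), l5 ++ [dv]) else (p4.1, l5)
    let p6 := if lv = 6 then (PySem.List.pySetD p5.1 5 (PySem.List.pyGetD p5.1 5 0 + 1), l6 ++ [dv]) else (p5.1, l6)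
    (p6.1, p1.2, p2.2, p3.2, p4.2, p5.2, p6.2)

def getNumOfLabels (data : List (List Int)) (label : List Int) : List Int × List (List Int) × List (List Int) × List (List Int) × List (List Int) × List (List Int) × List (List Int) :=
  (PySem.List.pyRange 0 (label.length : Int) 1).foldl (stepA data label)
    ([0, 0, 0, 0, 0, 0], [], [], [], [], [], [])

-- ===== PORT B =====
-- bucket(k) = [data[x] for x in range(len(label)) if label[x] == k]
def pvBucket (data : List (List Int)) (label : List Int) (k : Int) : List (List Int) :=
  ((PySem.List.pyRange 0 (label.length : Int) 1).filter
      (fun x => PySem.List.pyGetD label x 0 == k)).map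
    (fun x => PySem.List.pyGetD data x ([] : List Int))

def getNumOfLabels_alt (data : List (List Int)) (label : List Int) : List Int × List (List Int) × List (List Int) × List (List Int) × List (List Int) × List (List Int) × List (List Int) :=
  let b1 := pvBucket data label 1
  let b2 := pvBucket data label 2
  let b3 := pvBucket data label 3
  let b4 := pvBucket data label 4
  let b5 := pvBucket data label 5
  let b6 := pvBucket data label 6
  ([(b1.length : Int), (b2.length : Int), (b3.length : Int), (b4.length : Int), (b5.length : Int), (b6.length : Int)],
   b1, b2, b3, b4, b5, b6)

-- ===== PRECONDITION & SPEC =====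
-- Pre_ excludes exactly the inputs where Python A raises IndexError: some index x with
-- label[x] in 1..6 but x out of range for data (B raises there too).
def Pre_getNumOfLabels (data : List (List Int)) (label : List Int) : Prop :=
  ∀ x : Nat, x < label.length → (1 ≤ label.getD x 0 ∧ label.getD x 0 ≤ 6) → x < data.length
instance (data : List (List Int)) (label : List Int) : Decidable (Pre_getNumOfLabels data label) := by unfold Pre_getNumOfLabels; infer_instance

def pvWitness_getNumOfLabels : List (List Int) × List Int := ([[1, 2], [3]], [1, 9])

def Spec_getNumOfLabels (data : List (List Int)) (label : List Int) (out : List Int × List (List Int) × List (List Int) × List (List Int) × List (List Int) × List (List Int) × List (List Int)) : Prop := out = getNumOfLabels_alt data label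
instance (data : List (List Int)) (label : List Int) (out : List Int × List (List Int) × List (List Int) × List (List Int) × List (List Int) × List (List Int) × List (List Int)) : Decidable (Spec_getNumOfLabels data label out) := by
  unfold Spec_getNumOfLabels
  haveI i2 : DecidableEq (List (List Int) × List (List Int)) := inferInstance
  haveI i3 := @instDecidableEqProd (List (List Int)) _ _ i2
  haveI i4 := @instDecidableEqProd (List (List Int)) _ _ i3
  haveI i5 := @instDecidableEqProd (List (List Int)) _ _ i4
  haveI i6 := @instDecidableEqProd (List (List Int)) _ _ i5
  haveI i7 := @instDecidableEqProd (List Int) _ _ i6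
  exact i7 out (getNumOfLabels_alt data label)

-- ===== CLAIM (what is proved, stated in full; the proofs are below) =====
def Claim_equal_getNumOfLabels : Prop := ∀ (data : List (List Int)) (label : List Int), Dom_getNumOfLabels data label → Pre_getNumOfLabels data label → Spec_getNumOfLabels data label (getNumOfLabels data label)

-- ===== LEMMAS AND PROOFS =====

-- bucket over the first n indices
def pvBucketN (data : List (List Int)) (label : List Int) (k : Int) (n : Nat) : List (List Int) :=
  ((PySem.List.pyRange 0 (n : Int) 1).filter
      (fun x => PySem.List.pyGetD label x 0 == k)).map
    (fun x => PySem.List.pyGetD data x ([] : List Int))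

lemma pvBucketN_succ (data : List (List Int)) (label : List Int) (k : Int) (n : Nat) :
    pvBucketN data label k (n + 1) =
      pvBucketN data label k n ++
        (if PySem.List.pyGetD label (n : Int) 0 = k
          then [PySem.List.pyGetD data (n : Int) ([] : List Int)] else []) := by
  unfold pvBucketN
  rw [show ((n + 1 : Nat) : Int) = (n : Int) + 1 by push_cast; ring,
      PySem.List.pyRange_one_succ_right (by exact_mod_cast Nat.zero_le n),
      List.filter_append, List.map_append]
  by_cases h : PySem.List.pyGetD label (n : Int) 0 = k <;> simp_all

set_option maxHeartbeats 1600000 in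
lemma pvLoop (data : List (List Int)) (label : List Int) (n : Nat) :
    (PySem.List.pyRange 0 (n : Int) 1).foldl (stepA data label)
        ([0, 0, 0, 0, 0, 0], [], [], [], [], [], []) =
      (([((pvBucketN data label 1 n).length : Int), ((pvBucketN data label 2 n).length : Int),
          ((pvBucketN data label 3 n).length : Int), ((pvBucketN data label 4 n).length : Int),
          ((pvBucketN data label 5 n).length : Int), ((pvBucketN data label 6 n).length : Int)],
        pvBucketN data label 1 n, pvBucketN data label 2 n, pvBucketN data label 3 n,
        pvBucketN data label 4 n, pvBucketN data label 5 n, pvBucketN data label 6 n) : pvStateA) := by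
  induction n with
  | zero => simp [pvBucketN, PySem.List.pyRange_one_eq_nil]
  | succ m ih =>
    rw [show ((m + 1 : Nat) : Int) = (m : Int) + 1 by push_cast; ring,
        PySem.List.pyRange_one_succ_right (by exact_mod_cast Nat.zero_le m),
        List.foldl_append, ih]
    simp only [List.foldl_cons, List.foldl_nil]
    simp only [pvBucketN_succ]
    unfold stepA
    by_cases h1 : PySem.List.pyGetD label (m : Int) 0 = 1 <;>
      by_cases h2 : PySem.List.pyGetD label (m : Int) 0 = 2 <;>
      by_cases h3 : PySem.List.pyGetD label (m : Int) 0 = 3 <;>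
      by_cases h4 : PySem.List.pyGetD label (m : Int) 0 = 4 <;>
      by_cases h5 : PySem.List.pyGetD label (m : Int) 0 = 5 <;>
      by_cases h6 : PySem.List.pyGetD label (m : Int) 0 = 6 <;>
      simp_all [PySem.List.pySetD, PySem.List.pySet?, PySem.List.pyIdx?,
        PySem.List.pyGetD, PySem.List.pyGet?]

-- ===== VERDICT (by name: the statement is the Claim_ definition above) =====
theorem getNumOfLabels_spec : Claim_equal_getNumOfLabels := by
  intro data label _ _
  unfold Spec_getNumOfLabels
  exact pvLoop data label label.length
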